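-- pv_equiv track=rewrite | github.com/mouxuezha/text_JSQL | agent_guize/enemy_AI/agent/base_agent.py | select_by_devide
-- ===== SOURCE A (Python) =====
-- def select_by_devide(status):
--     # 这个也是有用的小工具，把选好的兵种分成010101的两队。
--     jieguo_status1 = {}
--     jieguo_status2 = {}
--     num_flag = True
--     for attacker_ID in status:
--         num_flag = not num_flag # 翻转一下标志位。
--         if num_flag:
--             jieguo_status1[attacker_ID] = status[attacker_ID]
--         else:
--             jieguo_status2[attacker_ID] = status[attacker_ID]
--
--     return jieguo_status1, jieguo_status2
-- ===== SOURCE B (Python) =====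
-- def select_by_devide(status):
--     # Split the dict into the two alternating halves by strided slicing:
--     # index 0,2,4,... go to status2 (A flips its flag before testing),
--     # index 1,3,5,... go to status1.
--     items = list(status.items())
--     jieguo_status2 = dict(items[0::2])
--     jieguo_status1 = dict(items[1::2])
--     return jieguo_status1, jieguo_status2
-- ===== Notes on version B (the rewrite author's own statement) =====
-- stated objective: simpler
-- what changed: Replaced the boolean-toggle loop with two branches by materializing the items once and building the halves with strided slices items[0::2] / items[1::2], eliminating the per-element flag and the dict lookups.
import Mathlib
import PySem

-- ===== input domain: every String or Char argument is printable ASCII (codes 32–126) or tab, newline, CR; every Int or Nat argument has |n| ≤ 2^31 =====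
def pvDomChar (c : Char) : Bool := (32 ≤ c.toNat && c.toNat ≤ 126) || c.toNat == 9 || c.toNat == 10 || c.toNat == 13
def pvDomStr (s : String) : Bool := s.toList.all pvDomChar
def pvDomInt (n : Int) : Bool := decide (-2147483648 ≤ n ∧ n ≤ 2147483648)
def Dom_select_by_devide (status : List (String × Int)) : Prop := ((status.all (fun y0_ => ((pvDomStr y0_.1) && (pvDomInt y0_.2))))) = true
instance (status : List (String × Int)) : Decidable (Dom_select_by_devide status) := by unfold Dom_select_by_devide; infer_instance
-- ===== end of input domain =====

-- B drops A's boolean toggle and branch: it builds the two halves from the items list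
-- by strided slicing (index parity); objective: simpler.

-- ===== PORT A =====
-- A: loop over the dict's keys with a flipping flag, inserting into one of two dicts;
-- state is (jieguo_status1, jieguo_status2, num_flag); 'status[attacker_ID]' is the
-- dict lookup, ported as first-match lookup in the association list (it never misses,
-- since the loop iterates the dict's own keys).
def select_by_devide (status : List (String × Int)) : (List (String × Int)) × (List (String × Int)) :=
  let r := status.foldl
    (fun (st : PySem.Dict String Int × PySem.Dict String Int × Bool) kv =>
      let num_flag := !st.2.2
      if num_flag then
        (st.1.insert kv.1 (((PySem.Dict.mk status).get? kv.1).getD 0), st.2.1, num_flag)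
      else
        (st.1, st.2.1.insert kv.1 (((PySem.Dict.mk status).get? kv.1).getD 0), num_flag))
    (PySem.Dict.empty, PySem.Dict.empty, true)
  (r.1.items, r.2.1.items)

-- ===== PORT B =====
-- B: items = list(status.items()); dict(items[0::2]) and dict(items[1::2]).
def select_by_devide_alt (status : List (String × Int)) : (List (String × Int)) × (List (String × Int)) :=
  let items := status
  let jieguo_status2 := PySem.Dict.ofList ((PySem.List.slice? items (some 0) none 2).getD [])
  let jieguo_status1 := PySem.Dict.ofList ((PySem.List.slice? items (some 1) none 2).getD [])
  (jieguo_status1.items, jieguo_status2.items)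

-- ===== PRECONDITION & SPEC =====
-- Pre_ excludes association lists with duplicate keys: the Python argument is a dict,
-- which can never contain a duplicate key, so no excluded input represents a Python input.
def Pre_select_by_devide (status : List (String × Int)) : Prop :=
  (status.map Prod.fst).Nodup
instance (status : List (String × Int)) : Decidable (Pre_select_by_devide status) := by
  unfold Pre_select_by_devide; infer_instance

def pvWitness_select_by_devide : (List (String × Int)) := [("a", 1), ("b", 2), ("c", 3)]

def Spec_select_by_devide (status : List (String × Int)) (out : (List (String × Int)) × (List (String × Int))) : Prop := out = select_by_devide_alt status
instance (status : List (String × Int)) (out : (List (String × Int)) × (List (String × Int))) : Decidable (Spec_select_by_devide status out) := by unfold Spec_select_by_devide; infer_instance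

-- ===== CLAIM (what is proved, stated in full; the proofs are below) =====
def Claim_equal_select_by_devide : Prop := ∀ (status : List (String × Int)), Dom_select_by_devide status → Pre_select_by_devide status → Spec_select_by_devide status (select_by_devide status)

-- ===== LEMMAS AND PROOFS =====

-- the elements A's loop sends to jieguo_status2 (resp. jieguo_status1) when it enters
-- the rest of the list carrying flag value f
def evensSel {α : Type} (f : Bool) : List α → List α
  | [] => []
  | x :: r => if f then x :: evensSel false r else evensSel true r

def oddsSel {α : Type} (f : Bool) : List α → List α
  | [] => []
  | x :: r => if f then oddsSel false r else x :: oddsSel true r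

theorem oddsSel_not_eq_evensSel {α : Type} (f : Bool) (l : List α) :
    oddsSel (!f) l = evensSel f l := by
  induction l generalizing f with
  | nil => rfl
  | cons x r ih =>
    cases f <;> simp [oddsSel, evensSel, ← ih]

-- the core of B: slicing with step 2 picks exactly the even-indexed elements
theorem filterMap_two_stride {α : Type} : ∀ (xs : List α),
    (List.range ((xs.length + 1) / 2)).filterMap (fun k => xs[2 * k]?) = evensSel true xs
  | [] => by simp [evensSel]
  | [x] => by simp [evensSel]
  | x :: y :: r => by
    have ih := filterMap_two_stride r
    simp only [List.length_cons]
    rw [show (r.length + 1 + 1 + 1) / 2 = (r.length + 1) / 2 + 1 by omega,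
        List.range_succ_eq_map, List.filterMap_cons, List.filterMap_map]
    simp only [Nat.mul_zero, List.getElem?_cons_zero, Function.comp_def, Nat.succ_eq_add_one,
      Nat.mul_add, Nat.mul_one]
    rw [List.filterMap_congr (g := fun k => r[2 * k]?) (fun k _ => by
      rw [show 2 * k + 2 = (2 * k + 1) + 1 by omega]; simp)]
    rw [ih]
    simp [evensSel]

theorem slice?_two_from_zero {α : Type} (xs : List α) :
    PySem.List.slice? xs (some 0) none 2 = some (evensSel true xs) := by
  have hc : (if 0 < xs.length then (((xs.length : Int) + 2 - 1) / 2).toNat else 0)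
      = (xs.length + 1) / 2 := by
    split <;> omega
  simp only [PySem.List.slice?, PySem.List.sliceIndices]
  norm_num
  rw [hc, ← filterMap_two_stride xs]
  exact List.filterMap_congr (fun k _ => by rw [show ((2 * (k : Int)).toNat) = 2 * k by omega])

theorem slice?_two_from_one {α : Type} (xs : List α) :
    PySem.List.slice? xs (some 1) none 2 = some (oddsSel true xs) := by
  cases xs with
  | nil => rfl
  | cons x r =>
    have h1 : oddsSel true (x :: r) = evensSel true r := by
      simp [oddsSel, ← oddsSel_not_eq_evensSel]
    have hc : (if 0 < r.length then (((r.length : Int) + 2 - 1) / 2).toNat else 0)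
        = (r.length + 1) / 2 := by
      split <;> omega
    simp only [PySem.List.slice?, PySem.List.sliceIndices]
    norm_num
    rw [hc, h1, ← filterMap_two_stride r]
    exact List.filterMap_congr (fun k _ => by
      rw [show ((1 + 2 * (k : Int)).toNat) = 2 * k + 1 by omega]
      simp)

-- A's loop splits into two independent insert-folds over the two selections
theorem foldA_split (g : String × Int → Int) :
    ∀ (l : List (String × Int)) (f : Bool) (d1 d2 : PySem.Dict String Int),
    l.foldl
      (fun (st : PySem.Dict String Int × PySem.Dict String Int × Bool) kv =>
        let num_flag := !st.2.2
        if num_flag then (st.1.insert kv.1 (g kv), st.2.1, num_flag)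
        else (st.1, st.2.1.insert kv.1 (g kv), num_flag))
      (d1, d2, f)
    = ((oddsSel f l).foldl (fun d kv => d.insert kv.1 (g kv)) d1,
       (evensSel f l).foldl (fun d kv => d.insert kv.1 (g kv)) d2,
       f ^^ decide (l.length % 2 = 1))
  | [], f, d1, d2 => by cases f <;> simp [oddsSel, evensSel]
  | kv :: r, f, d1, d2 => by
    cases f with
    | false =>
      rw [List.foldl_cons]
      simp only [Bool.not_false, reduceIte]
      rw [foldA_split g r true]
      simp only [oddsSel, evensSel, reduceIte, List.length_cons, List.foldl_cons, Prod.mk.injEq]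
      refine ⟨by trivial, by trivial, ?_⟩
      by_cases h : r.length % 2 = 1
      · have h2 : (r.length + 1) % 2 = 0 := by omega
        simp [h, h2]
      · have h2 : (r.length + 1) % 2 = 1 := by omega
        simp [h, h2]
    | true =>
      rw [List.foldl_cons]
      simp only [Bool.not_true, Bool.false_eq_true, reduceIte]
      rw [foldA_split g r false]
      simp only [oddsSel, evensSel, reduceIte, List.length_cons, List.foldl_cons, Prod.mk.injEq]
      refine ⟨by trivial, by trivial, ?_⟩
      by_cases h : r.length % 2 = 1
      · have h2 : (r.length + 1) % 2 = 0 := by omega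
        simp [h, h2]
      · have h2 : (r.length + 1) % 2 = 1 := by omega
        simp [h, h2]

theorem evensSel_sublist {α : Type} (f : Bool) (l : List α) : (evensSel f l).Sublist l := by
  induction l generalizing f with
  | nil => simp [evensSel]
  | cons x r ih =>
    cases f <;> simp only [evensSel, reduceIte]
    · exact (ih true).cons x
    · exact (ih false).cons₂ x

theorem oddsSel_sublist {α : Type} (f : Bool) (l : List α) : (oddsSel f l).Sublist l := by
  simpa [← oddsSel_not_eq_evensSel] using evensSel_sublist (!f) l

-- an insert-fold over distinct fresh keys builds exactly that items list
theorem items_insert_fold (l : List (String × Int)) (h : (l.map Prod.fst).Nodup) :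
    (l.foldl (fun (d : PySem.Dict String Int) kv => d.insert kv.1 kv.2) PySem.Dict.empty).items
      = l := by
  have h2 := PySem.Dict.items_foldl_insert_fresh l Prod.fst Prod.snd PySem.Dict.empty
    (fun a _ => by simp) h
  simpa using h2

-- under Nodup keys, A's lookup of kv.1 in the whole dict yields kv.2
theorem fold_congr_lookup (status l : List (String × Int))
    (hsub : l.Sublist status) (hnd : (status.map Prod.fst).Nodup)
    (d : PySem.Dict String Int) :
    l.foldl (fun d kv => d.insert kv.1 (((PySem.Dict.mk status).get? kv.1).getD 0)) d
      = l.foldl (fun d kv => d.insert kv.1 kv.2) d := by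
  apply PySem.List.foldl_congr_mem
  intro acc kv hmem
  have hmem' : kv ∈ status := hsub.mem hmem
  have hg : (PySem.Dict.mk status).get? kv.1 = some kv.2 := by
    apply PySem.Dict.get?_of_mem_items
    · exact hmem'
    · simpa [PySem.Dict.keys] using hnd
  simp [hg]

-- ===== VERDICT (by name: the statement is the Claim_ definition above) =====
theorem select_by_devide_spec : Claim_equal_select_by_devide := by
  intro status _hdom hpre
  unfold Spec_select_by_devide select_by_devide select_by_devide_alt
  simp only [slice?_two_from_zero, slice?_two_from_one, Option.getD_some]
  rw [foldA_split (fun kv => ((PySem.Dict.mk status).get? kv.1).getD 0) status true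
        PySem.Dict.empty PySem.Dict.empty]
  simp only
  rw [fold_congr_lookup status _ (oddsSel_sublist true status) hpre,
      fold_congr_lookup status _ (evensSel_sublist true status) hpre]
  unfold PySem.Dict.ofList PySem.Dict.update
  rw [items_insert_fold _ (((oddsSel_sublist true status).map Prod.fst).nodup hpre),
      items_insert_fold _ (((evensSel_sublist true status).map Prod.fst).nodup hpre)]
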